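-- pv_equiv track=rewrite | github.com/prodbyduke/battleship-py | data.py | is_in_board
-- ===== SOURCE A (Python) =====
-- ALPHABET = ['A', 'B', 'C', 'D', 'E', 'F', 'G', 'H', 'I', 'J', 'K', 'L',
--             'M', 'N', 'O', 'P', 'Q', 'R', 'S', 'T', 'U', 'V', 'W', 'X', 'Y', 'Z']
--
-- GRID_SIZE = 10
--
-- def is_in_board(event):
--     # Check if the pressed button is in a board
--     check = False
--     board_ids = []
--     for number in range(GRID_SIZE):
--         for letter in range(GRID_SIZE):
--             if(event[0:(len(event) - 1)] == (ALPHABET[letter] + str(number + 1))):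
--                 check = True
--                 break
--     return check
-- ===== SOURCE B (Python) =====
-- ALPHABET = ['A', 'B', 'C', 'D', 'E', 'F', 'G', 'H', 'I', 'J', 'K', 'L',
--             'M', 'N', 'O', 'P', 'Q', 'R', 'S', 'T', 'U', 'V', 'W', 'X', 'Y', 'Z']
--
-- GRID_SIZE = 10
--
-- def is_in_board(event):
--     # Parse-and-validate the cell id instead of enumerating all 100 candidates.
--     cell = event[0:len(event) - 1]
--     if len(cell) < 2:
--         return False
--     letter, num = cell[0], cell[1:]
--     return letter in ALPHABET[:GRID_SIZE] and (num == "10" or (len(num) == 1 and num in "123456789"))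
-- ===== Notes on version B (the rewrite author's own statement) =====
-- stated objective: simpler
-- what changed: B parses the event once (slice off the trailing char, split into letter and number part) and validates the parts directly, instead of A's double loop that builds and compares all 100 candidate cell strings.
import Mathlib
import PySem

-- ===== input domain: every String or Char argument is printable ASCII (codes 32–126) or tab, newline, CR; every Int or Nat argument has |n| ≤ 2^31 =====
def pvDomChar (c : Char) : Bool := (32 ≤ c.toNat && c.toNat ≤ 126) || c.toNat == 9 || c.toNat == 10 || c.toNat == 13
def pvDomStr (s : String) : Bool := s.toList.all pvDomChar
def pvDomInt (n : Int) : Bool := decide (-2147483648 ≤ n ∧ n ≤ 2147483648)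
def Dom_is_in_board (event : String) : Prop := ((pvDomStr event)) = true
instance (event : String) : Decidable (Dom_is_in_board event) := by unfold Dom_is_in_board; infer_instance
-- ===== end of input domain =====

-- B replaces A's enumeration of all 100 candidate cell strings by parsing the cell once and
-- validating the letter and the number part directly (objective: simpler).

-- ===== PORT A =====
-- ALPHABET: list of one-character strings, as lists of chars
def pvAlphabetA : List (List Char) :=
  [['A'],['B'],['C'],['D'],['E'],['F'],['G'],['H'],['I'],['J'],['K'],['L'],
   ['M'],['N'],['O'],['P'],['Q'],['R'],['S'],['T'],['U'],['V'],['W'],['X'],['Y'],['Z']]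

-- inner 'for letter in range(GRID_SIZE)' loop with its break
def pvInnerA (cell : List Char) (number : Int) : List Int → Bool → Bool
  | [], check => check
  | l :: ls, check =>
    if cell = PySem.List.pyGetD pvAlphabetA l [] ++ PySem.Int.toChars (number + 1) then
      true
    else
      pvInnerA cell number ls check

def is_in_board (event : String) : Bool :=
  let cell := PySem.List.slice event.toList (some 0) (some ((event.toList.length : Int) - 1))
  (PySem.List.pyRange 0 10 1).foldl
    (fun check number => pvInnerA cell number (PySem.List.pyRange 0 10 1) check) false

-- ===== PORT B =====
def pvLettersB : List Char := ['A','B','C','D','E','F','G','H','I','J']  -- ALPHABET[:GRID_SIZE]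
def pvDigitsB : List Char := ['1','2','3','4','5','6','7','8','9']

def is_in_board_alt (event : String) : Bool :=
  let cell := PySem.List.slice event.toList (some 0) (some ((event.toList.length : Int) - 1))
  match cell with
  | [] => false                                      -- len(cell) < 2
  | letter :: num =>
    if num = [] then false                           -- len(cell) < 2
    else
      decide (letter ∈ pvLettersB) &&
        (num == ['1','0'] || (num.length == 1 && PySem.Chars.isIn num pvDigitsB))

-- ===== PRECONDITION & SPEC =====
def Spec_is_in_board (event : String) (out : Bool) : Prop := out = is_in_board_alt event
instance (event : String) (out : Bool) : Decidable (Spec_is_in_board event out) := by unfold Spec_is_in_board; infer_instance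

-- ===== CLAIM (what is proved, stated in full; the proofs are below) =====
def Claim_equal_is_in_board : Prop := ∀ (event : String), Dom_is_in_board event → Spec_is_in_board event (is_in_board event)

-- ===== LEMMAS AND PROOFS =====

-- the number strings "1".."10" in A's enumeration order
def pvNumsB : List (List Char) := [['1'],['2'],['3'],['4'],['5'],['6'],['7'],['8'],['9'],['1','0']]

lemma pv_slice_dropLast (l : List Char) :
    PySem.List.slice l (some 0) (some ((l.length : Int) - 1)) = l.dropLast := by
  cases l with
  | nil => decide
  | cons a t =>
    have h : ((a :: t).length : Int) - 1 = ((t.length : Nat) : Int) := by simp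
    rw [h, PySem.List.slice_zero_start, PySem.List.slice_to_natCast]
    simp [List.dropLast_eq_take]

lemma pv_innerA_eq (cell : List Char) (number : Int) (letters : List Int) (check : Bool) :
    pvInnerA cell number letters check =
      (check || letters.any fun l =>
        decide (cell = PySem.List.pyGetD pvAlphabetA l [] ++ PySem.Int.toChars (number + 1))) := by
  induction letters generalizing check with
  | nil => simp [pvInnerA]
  | cons l ls ih =>
    by_cases h : cell = PySem.List.pyGetD pvAlphabetA l [] ++ PySem.Int.toChars (number + 1)
    · simp [pvInnerA, h]
    · simp [pvInnerA, h, ih]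

lemma pv_foldl_or (f : Int → Bool) (l : List Int) (b : Bool) :
    l.foldl (fun acc x => acc || f x) b = (b || l.any f) := by
  induction l generalizing b with
  | nil => simp
  | cons x xs ih => simp [List.foldl_cons, ih, Bool.or_assoc]

lemma pv_isIn_singleton (d : Char) (s : List Char) :
    PySem.Chars.isIn [d] s = true ↔ d ∈ s := by
  rw [PySem.Chars.isIn_iff_infix]
  constructor
  · intro h
    exact List.singleton_sublist.mp h.sublist
  · intro h
    obtain ⟨s1, s2, rfl⟩ := List.append_of_mem h
    exact ⟨s1, s2, by simp⟩

lemma pv_num_mem_iff (num : List Char) (hne : num ≠ []) :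
    num ∈ pvNumsB ↔
      (num == ['1','0'] || (num.length == 1 && PySem.Chars.isIn num pvDigitsB)) = true := by
  constructor
  · intro h
    simp only [pvNumsB, List.mem_cons, List.not_mem_nil, or_false] at h
    rcases h with rfl | rfl | rfl | rfl | rfl | rfl | rfl | rfl | rfl | rfl <;> decide
  · intro h
    rcases Bool.or_eq_true_iff.mp h with h10 | h1
    · have : num = ['1','0'] := by simpa using h10
      subst this; decide
    · obtain ⟨hlen, hin⟩ := Bool.and_eq_true_iff.mp h1
      obtain ⟨d, rfl⟩ := List.length_eq_one_iff.mp (by simpa using hlen)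
      have hd : d ∈ pvDigitsB := (pv_isIn_singleton d pvDigitsB).mp hin
      simp only [pvDigitsB, List.mem_cons, List.not_mem_nil, or_false] at hd
      rcases hd with rfl | rfl | rfl | rfl | rfl | rfl | rfl | rfl | rfl <;> decide

-- the double loop, characterised as: cell is some letter of the board followed by some number string
lemma pv_exists_map {α β : Type} (g : α → β) (R : List α) (P : β → Prop) :
    (∃ a ∈ R, P (g a)) ↔ ∃ y ∈ R.map g, P y := by
  constructor
  · rintro ⟨a, ha, h⟩
    exact ⟨g a, List.mem_map_of_mem ha, h⟩
  · rintro ⟨y, hy, h⟩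
    obtain ⟨a, ha, rfl⟩ := List.mem_map.mp hy
    exact ⟨a, ha, h⟩

lemma pv_anyA_iff (cell : List Char) :
    ((PySem.List.pyRange 0 10 1).any fun n => (PySem.List.pyRange 0 10 1).any fun l =>
        decide (cell = PySem.List.pyGetD pvAlphabetA l [] ++ PySem.Int.toChars (n + 1))) = true ↔
      ∃ c ∈ pvLettersB, ∃ y ∈ pvNumsB, cell = c :: y := by
  have hmapL : (PySem.List.pyRange 0 10 1).map
      (fun l => PySem.List.pyGetD pvAlphabetA l []) = pvLettersB.map (fun c => [c]) := by
    set_option maxRecDepth 8000 in decide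
  have hmapN : (PySem.List.pyRange 0 10 1).map
      (fun n => PySem.Int.toChars (n + 1)) = pvNumsB := by
    set_option maxRecDepth 8000 in decide
  simp only [List.any_eq_true, decide_eq_true_eq]
  calc (∃ n ∈ PySem.List.pyRange 0 10 1, ∃ l ∈ PySem.List.pyRange 0 10 1,
          cell = PySem.List.pyGetD pvAlphabetA l [] ++ PySem.Int.toChars (n + 1))
      ↔ ∃ n ∈ PySem.List.pyRange 0 10 1, ∃ x ∈ pvLettersB.map (fun c => [c]),
          cell = x ++ PySem.Int.toChars (n + 1) := by
        refine exists_congr fun n => and_congr_right fun _ => ?_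
        rw [pv_exists_map (fun l => PySem.List.pyGetD pvAlphabetA l [])
          (PySem.List.pyRange 0 10 1) (fun x => cell = x ++ PySem.Int.toChars (n + 1)), hmapL]
    _ ↔ ∃ n ∈ PySem.List.pyRange 0 10 1, ∃ c ∈ pvLettersB,
          cell = c :: PySem.Int.toChars (n + 1) := by
        refine exists_congr fun n => and_congr_right fun _ => ?_
        rw [← pv_exists_map (fun c => [c]) pvLettersB
          (fun x => cell = x ++ PySem.Int.toChars (n + 1))]
        simp only [List.singleton_append]
    _ ↔ ∃ c ∈ pvLettersB, ∃ n ∈ PySem.List.pyRange 0 10 1,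
          cell = c :: PySem.Int.toChars (n + 1) := by
        constructor
        · rintro ⟨n, hn, c, hc, h⟩; exact ⟨c, hc, n, hn, h⟩
        · rintro ⟨c, hc, n, hn, h⟩; exact ⟨n, hn, c, hc, h⟩
    _ ↔ ∃ c ∈ pvLettersB, ∃ y ∈ pvNumsB, cell = c :: y := by
        refine exists_congr fun c => and_congr_right fun _ => ?_
        rw [pv_exists_map (fun n => PySem.Int.toChars (n + 1))
          (PySem.List.pyRange 0 10 1) (fun y => cell = c :: y), hmapN]

lemma pv_core (cell : List Char) :
    ((PySem.List.pyRange 0 10 1).any fun n => (PySem.List.pyRange 0 10 1).any fun l =>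
        decide (cell = PySem.List.pyGetD pvAlphabetA l [] ++ PySem.Int.toChars (n + 1)))
    = (match cell with
       | [] => false
       | letter :: num =>
         if num = [] then false
         else decide (letter ∈ pvLettersB) &&
           (num == ['1','0'] || (num.length == 1 && PySem.Chars.isIn num pvDigitsB))) := by
  rw [Bool.eq_iff_iff, pv_anyA_iff]
  cases cell with
  | nil =>
    simp
  | cons letter num =>
    by_cases hnum : num = []
    · subst hnum
      simp [pvNumsB]
    · simp only [if_neg hnum]
      constructor
      · rintro ⟨c, hc, y, hy, h⟩
        injection h with h1 h2
        subst h1; subst h2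
        simp only [Bool.and_eq_true, decide_eq_true_eq]
        exact ⟨hc, (pv_num_mem_iff _ hnum).mp hy⟩
      · intro h
        obtain ⟨hc, hrest⟩ := Bool.and_eq_true_iff.mp h
        exact ⟨letter, of_decide_eq_true hc, num, (pv_num_mem_iff num hnum).mpr hrest, rfl⟩

-- ===== VERDICT (by name: the statement is the Claim_ definition above) =====
theorem is_in_board_spec : Claim_equal_is_in_board := by
  intro event _
  unfold Spec_is_in_board is_in_board is_in_board_alt
  simp only [pv_slice_dropLast]
  generalize event.toList.dropLast = cell
  calc (PySem.List.pyRange 0 10 1).foldl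
        (fun check number => pvInnerA cell number (PySem.List.pyRange 0 10 1) check) false
      = (PySem.List.pyRange 0 10 1).foldl
        (fun check number => check || (PySem.List.pyRange 0 10 1).any fun l =>
          decide (cell = PySem.List.pyGetD pvAlphabetA l [] ++ PySem.Int.toChars (number + 1))) false := by
        have hfun : (fun (check : Bool) (number : Int) =>
            pvInnerA cell number (PySem.List.pyRange 0 10 1) check)
            = (fun check number => check || (PySem.List.pyRange 0 10 1).any fun l =>
              decide (cell = PySem.List.pyGetD pvAlphabetA l [] ++ PySem.Int.toChars (number + 1))) := by
          funext check number
          exact pv_innerA_eq cell number _ check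
        rw [hfun]
    _ = ((PySem.List.pyRange 0 10 1).any fun n => (PySem.List.pyRange 0 10 1).any fun l =>
          decide (cell = PySem.List.pyGetD pvAlphabetA l [] ++ PySem.Int.toChars (n + 1))) := by
        rw [pv_foldl_or]; simp
    _ = _ := pv_core cell
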